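-- pv_equiv track=rewrite | github.com/NayanaChandrika99/mini-town | backend/dspy_modules.py | _timeline_without_overlap
-- ===== SOURCE A (Python) =====
-- from typing import Any, Dict, List, Optional, TypedDict, Tuple
--
-- def _timeline_without_overlap(timeline: List[Tuple[Optional[int], Optional[int]]]) -> bool:
--     sanitized: List[Tuple[int, int]] = []
--     for start, end in timeline:
--         if start is None or end is None or start >= end:
--             return False
--         sanitized.append((start, end))
--     for idx in range(len(sanitized) - 1):
--         _, current_end = sanitized[idx]
--         next_start, _ = sanitized[idx + 1]
--         if current_end > next_start:
--             return False
--     return True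
-- ===== SOURCE B (Python) =====
-- from typing import List, Optional, Tuple
--
-- def _timeline_without_overlap(timeline: List[Tuple[Optional[int], Optional[int]]]) -> bool:
--     prev_end: Optional[int] = None
--     for start, end in timeline:
--         if start is None or end is None or start >= end:
--             return False
--         if prev_end is not None and prev_end > start:
--             return False
--         prev_end = end
--     return True
-- ===== Notes on version B (the rewrite author's own statement) =====
-- stated objective: simpler
-- what changed: B fuses A's two phases (build a sanitized copy, then scan adjacent pairs by index) into one linear pass that keeps only the previous interval's end, allocating no intermediate list.
import Mathlib
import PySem

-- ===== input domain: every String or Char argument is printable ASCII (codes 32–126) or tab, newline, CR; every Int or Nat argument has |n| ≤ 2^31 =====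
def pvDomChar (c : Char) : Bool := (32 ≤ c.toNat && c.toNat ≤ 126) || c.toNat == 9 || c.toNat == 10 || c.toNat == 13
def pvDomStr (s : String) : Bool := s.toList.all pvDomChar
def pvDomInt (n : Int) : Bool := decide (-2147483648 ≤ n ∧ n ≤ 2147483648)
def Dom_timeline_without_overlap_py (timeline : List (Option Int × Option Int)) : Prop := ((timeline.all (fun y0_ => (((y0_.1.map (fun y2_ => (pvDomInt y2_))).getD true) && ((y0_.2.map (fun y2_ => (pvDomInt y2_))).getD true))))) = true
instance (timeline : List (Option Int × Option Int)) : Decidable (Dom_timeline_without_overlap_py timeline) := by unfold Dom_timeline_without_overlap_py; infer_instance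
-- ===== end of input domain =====

-- B replaces A's two phases (build a sanitized list, then scan adjacent pairs) by one
-- pass that keeps only the previous interval's end (objective: simpler, O(1) extra space).

-- ===== PORT A =====
-- first loop of A: validate each pair and build the sanitized list; none = early `return False`
def pvA_build : List (Option Int × Option Int) → Option (List (Int × Int))
  | [] => some []
  | (s?, e?) :: rest =>
    match s?, e? with
    | some s, some e =>
      if s ≥ e then none
      else match pvA_build rest with
        | none => none
        | some l => some ((s, e) :: l)
    | _, _ => none

-- second loop of A: for idx in range(len-1), compare sanitized[idx].end with sanitized[idx+1].start
def pvA_check : List (Int × Int) → Bool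
  | (_, e) :: (s2, e2) :: rest => if e > s2 then false else pvA_check ((s2, e2) :: rest)
  | _ => true

def timeline_without_overlap_py (timeline : List (Option Int × Option Int)) : Bool :=
  match pvA_build timeline with
  | none => false
  | some sanitized => pvA_check sanitized

-- ===== PORT B =====
-- single pass, carrying prev_end : Option Int
def pvB_loop (prev_end : Option Int) : List (Option Int × Option Int) → Bool
  | [] => true
  | (s?, e?) :: rest =>
    match s?, e? with
    | some s, some e =>
      if s ≥ e then false
      else
        match prev_end with
        | some p => if p > s then false else pvB_loop (some e) rest
        | none => pvB_loop (some e) rest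
    | _, _ => false

def timeline_without_overlap_py_alt (timeline : List (Option Int × Option Int)) : Bool :=
  pvB_loop none timeline

-- ===== PRECONDITION & SPEC =====
def Spec_timeline_without_overlap_py (timeline : List (Option Int × Option Int)) (out : Bool) : Prop := out = timeline_without_overlap_py_alt timeline
instance (timeline : List (Option Int × Option Int)) (out : Bool) : Decidable (Spec_timeline_without_overlap_py timeline out) := by unfold Spec_timeline_without_overlap_py; infer_instance

-- ===== CLAIM (what is proved, stated in full; the proofs are below) =====
def Claim_equal_timeline_without_overlap_py : Prop := ∀ (timeline : List (Option Int × Option Int)), Dom_timeline_without_overlap_py timeline → Spec_timeline_without_overlap_py timeline (timeline_without_overlap_py timeline)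

-- ===== LEMMAS AND PROOFS =====

-- how A's check behaves when a previous end `prev` precedes the sanitized list
def pvCheckP : Option Int → List (Int × Int) → Bool
  | none, l => pvA_check l
  | some _, [] => true
  | some p, (s, e) :: rest => if p > s then false else pvA_check ((s, e) :: rest)

theorem pvB_eq_A (timeline : List (Option Int × Option Int)) (prev : Option Int) :
    pvB_loop prev timeline =
      (match pvA_build timeline with
       | none => false
       | some l => pvCheckP prev l) := by
  induction timeline generalizing prev with
  | nil => cases prev <;> simp [pvB_loop, pvA_build, pvCheckP, pvA_check]
  | cons hd tl ih =>
    obtain ⟨s?, e?⟩ := hd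
    match s?, e? with
    | none, _ => cases prev <;> simp [pvB_loop, pvA_build]
    | some s, none => cases prev <;> simp [pvB_loop, pvA_build]
    | some s, some e =>
      by_cases hse : s ≥ e
      · cases prev <;> simp [pvB_loop, pvA_build, hse]
      · have ihrest := ih (some e)
        cases prev with
        | none =>
          simp only [pvB_loop, pvA_build, if_neg hse, ihrest]
          cases h : pvA_build tl with
          | none => simp
          | some l =>
            cases l with
            | nil => simp [pvCheckP, pvA_check]
            | cons p r => obtain ⟨s2, e2⟩ := p; simp [pvCheckP, pvA_check]
        | some p =>
          by_cases hps : p > s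
          · simp [pvB_loop, pvA_build, if_neg hse, hps, pvCheckP]
            cases h : pvA_build tl <;> simp [hps]
          · simp only [pvB_loop, pvA_build, if_neg hse, ihrest]
            cases h : pvA_build tl with
            | none => simp [hps]
            | some l =>
              cases l with
              | nil => simp [pvCheckP, pvA_check, hps]
              | cons q r => obtain ⟨s2, e2⟩ := q; simp [pvCheckP, pvA_check, hps]

-- ===== VERDICT (by name: the statement is the Claim_ definition above) =====
theorem timeline_without_overlap_py_spec : Claim_equal_timeline_without_overlap_py := by
  intro timeline _
  unfold Spec_timeline_without_overlap_py timeline_without_overlap_py timeline_without_overlap_py_alt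
  rw [pvB_eq_A]
  cases pvA_build timeline <;> simp [pvCheckP]
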